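-- pv_equiv track=rewrite | github.com/SumoLogic/sumologic-openshift-images | scripts/generate_certification_matrix.py | get_latest_images
-- ===== SOURCE A (Python) =====
-- def get_latest_version(versions):
--     """Get the latest version from a list, preferring semantic versions over 'latest' tag"""
--     # Filter out 'latest' tags
--     non_latest = [v for v in versions if v['tag'] != 'latest']
--     if non_latest:
--         # Return the last one (assuming sorted order from list-images.py)
--         return non_latest[-1]
--     # If only 'latest' tags, return the first one
--     return versions[0] if versions else None
--
-- def group_by_name(images):
--     """Group images by name"""
--     by_name = {}
--     for img in images:
--         name = img['name']
--         if name not in by_name: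
--             by_name[name] = []
--         by_name[name].append(img)
--     return by_name
--
-- def get_latest_images(images):
--     """Get the latest version of each image by name"""
--     by_name = group_by_name(images)
--     latest = {}
--     for name, versions in by_name.items():
--         latest_version = get_latest_version(versions)
--         if latest_version:
--             latest[name] = latest_version
--     return latest
-- ===== SOURCE B (Python) =====
-- def get_latest_images(images):
--     """Get the latest version of each image by name (single pass, no grouping)."""
--     latest = {}
--     for img in images:
--         name = img['name']
--         if name not in latest or img['tag'] != 'latest':
--             latest[name] = img
--     return latest
-- ===== Notes on version B (the rewrite author's own statement) =====
-- stated objective: simpler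
-- what changed: One pass over images maintaining a single result dict with conditional overwrite (insert on first sight, overwrite on any non-'latest' tag) instead of grouping into per-name version lists and then reducing each group.
import Mathlib
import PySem

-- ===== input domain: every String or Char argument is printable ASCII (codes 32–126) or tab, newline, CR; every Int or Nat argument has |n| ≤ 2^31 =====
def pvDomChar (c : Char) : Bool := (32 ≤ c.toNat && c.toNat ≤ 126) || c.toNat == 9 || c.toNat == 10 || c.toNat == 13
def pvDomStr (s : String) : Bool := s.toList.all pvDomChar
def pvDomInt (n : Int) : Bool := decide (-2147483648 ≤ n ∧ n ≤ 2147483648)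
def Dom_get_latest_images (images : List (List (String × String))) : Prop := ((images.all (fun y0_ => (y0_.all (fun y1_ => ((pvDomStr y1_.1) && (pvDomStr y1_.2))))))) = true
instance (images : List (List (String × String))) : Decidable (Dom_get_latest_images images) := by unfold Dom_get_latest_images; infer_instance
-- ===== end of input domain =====

-- B replaces A's group-into-per-name-lists-then-reduce by a single pass over the images
-- keeping one result dict (insert on first sight, overwrite on a non-'latest' tag): simpler, no intermediate lists.


-- ===== PORT A =====
-- img[k] on a dict argument (none = KeyError; Pre_ excludes those inputs)
def pvKey (img : List (String × String)) (k : String) : Option String :=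
  (PySem.Dict.mk img).get? k

def get_latest_version (versions : List (List (String × String))) :
    Option (List (String × String)) :=
  let non_latest := versions.filter (fun v => (pvKey v "tag").getD "" != "latest")
  if non_latest ≠ [] then
    PySem.List.pyGet? non_latest (-1)
  else
    if versions ≠ [] then PySem.List.pyGet? versions 0 else none

def group_by_name (images : List (List (String × String))) :
    PySem.Dict String (List (List (String × String))) :=
  images.foldl (fun by_name img =>
    let name := (pvKey img "name").getD ""
    let by_name := if by_name.contains name then by_name else by_name.insert name []
    by_name.modify name [] (fun l => l ++ [img])) PySem.Dict.empty

def get_latest_images (images : List (List (String × String))) :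
    List (String × List (String × String)) :=
  let by_name := group_by_name images
  (by_name.items.foldl (fun latest nv =>
    match get_latest_version nv.2 with
    | some lv => if lv ≠ [] then latest.insert nv.1 lv else latest
    | none => latest) PySem.Dict.empty).items

-- ===== PORT B =====
def get_latest_images_alt (images : List (List (String × String))) :
    List (String × List (String × String)) :=
  (images.foldl (fun latest img =>
    let name := (pvKey img "name").getD ""
    if !latest.contains name || (pvKey img "tag").getD "" != "latest" then
      latest.insert name img
    else latest) PySem.Dict.empty).items

-- ===== PRECONDITION & SPEC =====
-- Pre_ excludes exactly the inputs where A raises KeyError: some image lacks the key "name" or "tag".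
def Pre_get_latest_images (images : List (List (String × String))) : Prop :=
  ∀ img ∈ images, (PySem.Dict.mk img).contains "name" = true ∧ (PySem.Dict.mk img).contains "tag" = true
instance (images : List (List (String × String))) : Decidable (Pre_get_latest_images images) := by unfold Pre_get_latest_images; infer_instance

def pvWitness_get_latest_images : (List (List (String × String))) :=
  [[("name", "kafka"), ("tag", "1.0")], [("name", "kafka"), ("tag", "latest")]]

def Spec_get_latest_images (images : List (List (String × String))) (out : List (String × List (String × String))) : Prop := out = get_latest_images_alt images
instance (images : List (List (String × String))) (out : List (String × List (String × String))) : Decidable (Spec_get_latest_images images out) := by unfold Spec_get_latest_images; infer_instance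

-- ===== CLAIM (what is proved, stated in full; the proofs are below) =====
def Claim_equal_get_latest_images : Prop := ∀ (images : List (List (String × String))), Dom_get_latest_images images → Pre_get_latest_images images → Spec_get_latest_images images (get_latest_images images)

-- ===== LEMMAS AND PROOFS =====

-- abbreviations for the two loop bodies (definitionally the ports' lambdas)
def pvName (img : List (String × String)) : String := (pvKey img "name").getD ""
def pvTagP (img : List (String × String)) : Bool := (pvKey img "tag").getD "" != "latest"

def pvStepA (by_name : PySem.Dict String (List (List (String × String))))
    (img : List (String × String)) : PySem.Dict String (List (List (String × String))) :=
  let name := (pvKey img "name").getD ""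
  let by_name := if by_name.contains name then by_name else by_name.insert name []
  by_name.modify name [] (fun l => l ++ [img])

def pvStepB (latest : PySem.Dict String (List (String × String)))
    (img : List (String × String)) : PySem.Dict String (List (String × String)) :=
  let name := (pvKey img "name").getD ""
  if !latest.contains name || (pvKey img "tag").getD "" != "latest" then
    latest.insert name img
  else latest

-- last non-'latest' entry of the group, else the seed
def pvH (cur : List (String × String)) (l : List (List (String × String))) : List (String × String) :=
  l.foldl (fun cur img => if pvTagP img then img else cur) cur

def pvChoose (vs : List (List (String × String))) : List (String × String) :=
  match vs with
  | [] => []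
  | v :: rest => pvH v rest

-- the effect of B's loop on one key
def pvG (k : String) (o : Option (List (String × String)))
    (l : List (List (String × String))) : Option (List (String × String)) :=
  l.foldl (fun o img =>
    if pvName img == k then
      match o with
      | none => some img
      | some cur => if pvTagP img then some img else some cur
    else o) o

theorem pvG_cons (k : String) (o : Option (List (String × String)))
    (x : List (String × String)) (l : List (List (String × String))) :
    pvG k o (x :: l) = pvG k
      (if pvName x == k then
        match o with
        | none => some x
        | some cur => if pvTagP x then some x else some cur
      else o) l := by
  unfold pvG
  rw [List.foldl_cons]

theorem pvStepA_keys (G : PySem.Dict String (List (List (String × String)))) (img : List (String × String)) :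
    (pvStepA G img).keys = PySem.Set.add G.keys (pvName img) := by
  unfold pvStepA
  by_cases hc : G.contains ((pvKey img "name").getD "") = true
  · have hm : ((pvKey img "name").getD "") ∈ G.keys := (PySem.Dict.contains_iff_mem_keys G _).mp hc
    simp only [hc, if_true, PySem.Dict.keys_modify]
    rw [PySem.Dict.keys_insert_of_contains _ _ hc]
    simp [PySem.Set.add, pvName, hm]
  · have hc' : G.contains ((pvKey img "name").getD "") = false := by simpa using hc
    have hnm : ((pvKey img "name").getD "") ∉ G.keys := fun hm => by
      simp [(PySem.Dict.contains_iff_mem_keys G _).mpr hm] at hc'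
    simp only [hc', Bool.false_eq_true, if_false, PySem.Dict.keys_modify]
    rw [PySem.Dict.keys_insert_of_contains _ _ (PySem.Dict.contains_insert_self _ _ _),
        PySem.Dict.keys_insert_of_not_contains _ _ hc']
    simp [PySem.Set.add, pvName, hnm]

theorem pvFoldA_keys (l : List (List (String × String))) (G : PySem.Dict String (List (List (String × String)))) :
    (l.foldl pvStepA G).keys = PySem.Set.update G.keys (l.map pvName) := by
  induction l generalizing G with
  | nil => simp [PySem.Set.update_nil]
  | cons x l ih => rw [List.foldl_cons, ih, pvStepA_keys, List.map_cons, PySem.Set.update_cons]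

theorem pvStepA_getD (G : PySem.Dict String (List (List (String × String)))) (img : List (String × String)) (k : String) :
    (pvStepA G img).getD k [] = if k = pvName img then G.getD k [] ++ [img] else G.getD k [] := by
  unfold pvStepA
  by_cases hc : G.contains ((pvKey img "name").getD "") = true
  · simp only [hc, if_true, PySem.Dict.getD_modify]
    unfold pvName
    split_ifs with hk
    · rw [hk]
    · rfl
  · have hc' : G.contains ((pvKey img "name").getD "") = false := by simpa using hc
    simp only [hc', Bool.false_eq_true, if_false, PySem.Dict.getD_modify]
    unfold pvName
    split_ifs with hk
    · rw [hk, PySem.Dict.getD_insert_self, PySem.Dict.getD_of_not_contains _ _ hc']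
    · rw [PySem.Dict.getD_insert]
      simp [hk]

theorem pvFoldA_getD (l : List (List (String × String))) (G : PySem.Dict String (List (List (String × String)))) (k : String) :
    (l.foldl pvStepA G).getD k [] = G.getD k [] ++ l.filter (fun i => pvName i == k) := by
  induction l generalizing G with
  | nil => simp
  | cons x l ih =>
    rw [List.foldl_cons, ih, pvStepA_getD, List.filter_cons]
    by_cases hk : k = pvName x
    · simp [hk, List.append_assoc]
    · have : (pvName x == k) = false := by simpa using fun h => hk h.symm
      simp [hk, this]

theorem pvStepB_keys (L : PySem.Dict String (List (String × String))) (img : List (String × String)) :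
    (pvStepB L img).keys = PySem.Set.add L.keys (pvName img) := by
  unfold pvStepB
  by_cases hc : L.contains ((pvKey img "name").getD "") = true
  · have hm : ((pvKey img "name").getD "") ∈ L.keys := (PySem.Dict.contains_iff_mem_keys L _).mp hc
    have hadd : PySem.Set.add L.keys (pvName img) = L.keys := by
      simp [PySem.Set.add, pvName, hm]
    by_cases ht : ((pvKey img "tag").getD "" != "latest") = true
    · simp only [hc, ht, Bool.not_true, Bool.false_or, if_true]
      rw [PySem.Dict.keys_insert_of_contains _ _ hc, hadd]
    · have ht' : ((pvKey img "tag").getD "" != "latest") = false := by simpa using ht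
      rw [hadd]
      simp [hc, ht']
  · have hc' : L.contains ((pvKey img "name").getD "") = false := by simpa using hc
    have hnm : ((pvKey img "name").getD "") ∉ L.keys := fun hm => by
      simp [(PySem.Dict.contains_iff_mem_keys L _).mpr hm] at hc'
    simp only [hc', Bool.not_false, Bool.true_or, if_true]
    rw [PySem.Dict.keys_insert_of_not_contains _ _ hc']
    simp [PySem.Set.add, pvName, hnm]

theorem pvFoldB_keys (l : List (List (String × String))) (L : PySem.Dict String (List (String × String))) :
    (l.foldl pvStepB L).keys = PySem.Set.update L.keys (l.map pvName) := by
  induction l generalizing L with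
  | nil => simp [PySem.Set.update_nil]
  | cons x l ih => rw [List.foldl_cons, ih, pvStepB_keys, List.map_cons, PySem.Set.update_cons]

theorem pvStepB_get? (L : PySem.Dict String (List (String × String))) (img : List (String × String)) (k : String) :
    (pvStepB L img).get? k =
      (if pvName img == k then
        match L.get? k with
        | none => some img
        | some cur => if pvTagP img then some img else some cur
      else L.get? k) := by
  unfold pvStepB
  by_cases hk : (pvName img == k) = true
  · have hk' : (pvKey img "name").getD "" = k := by simpa [pvName] using hk
    cases hLk : L.get? k with
    | none =>
      have hc : L.contains ((pvKey img "name").getD "") = false := by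
        rw [PySem.Dict.contains_eq_isSome_get?, hk', hLk]; rfl
      simp only [hc, Bool.not_false, Bool.true_or, if_true, hk]
      rw [hk', PySem.Dict.get?_insert_self]
    | some cur =>
      have hc : L.contains ((pvKey img "name").getD "") = true := by
        rw [PySem.Dict.contains_eq_isSome_get?, hk', hLk]; rfl
      by_cases ht : ((pvKey img "tag").getD "" != "latest") = true
      · simp only [hc, ht, Bool.not_true, Bool.false_or, if_true, hk, pvTagP]
        rw [hk', PySem.Dict.get?_insert_self]
      · have ht' : ((pvKey img "tag").getD "" != "latest") = false := by simpa using ht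
        simp [hc, ht', hk, hLk, pvTagP]
  · have hk2 : k ≠ (pvKey img "name").getD "" := by
      intro h
      apply hk
      show (pvName img == k) = true
      unfold pvName
      rw [← h]
      exact beq_self_eq_true k
    by_cases hcond : (!L.contains ((pvKey img "name").getD "") || ((pvKey img "tag").getD "" != "latest")) = true
    · simp only [hcond, if_true, hk, Bool.false_eq_true, if_false]
      rw [PySem.Dict.get?_insert_of_ne _ _ hk2]
    · simp only [hcond, Bool.false_eq_true, if_false, hk]

theorem pvFoldB_get? (l : List (List (String × String))) (L : PySem.Dict String (List (String × String))) (k : String) :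
    (l.foldl pvStepB L).get? k = pvG k (L.get? k) l := by
  induction l generalizing L with
  | nil => rfl
  | cons x l ih =>
    rw [List.foldl_cons, ih, pvStepB_get?, pvG_cons]

theorem pvG_filter (k : String) (o : Option (List (String × String))) (l : List (List (String × String))) :
    pvG k o l = pvG k o (l.filter (fun i => pvName i == k)) := by
  induction l generalizing o with
  | nil => rfl
  | cons x l ih =>
    rw [List.filter_cons, pvG_cons]
    by_cases h : (pvName x == k) = true
    · rw [if_pos h, if_pos h, pvG_cons, if_pos h]
      exact ih _
    · rw [if_neg h, if_neg h]
      exact ih o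

theorem pvG_some (k : String) (l : List (List (String × String))) (cur : List (String × String))
    (h : ∀ i ∈ l, pvName i = k) : pvG k (some cur) l = some (pvH cur l) := by
  induction l generalizing cur with
  | nil => rfl
  | cons x l ih =>
    have hx : (pvName x == k) = true := by simp [h x (by simp)]
    rw [pvG_cons, if_pos hx]
    have hstep : (match some cur with
        | none => some x
        | some cur => if pvTagP x then some x else some cur)
        = some (if pvTagP x then x else cur) := by
      by_cases ht : pvTagP x <;> simp [ht]
    rw [hstep, ih _ (fun i hi => h i (by simp [hi]))]
    have hh : pvH cur (x :: l) = pvH (if pvTagP x then x else cur) l := by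
      unfold pvH; rw [List.foldl_cons]
    rw [hh]

theorem pvH_mem (l : List (List (String × String))) (cur : List (String × String)) :
    pvH cur l ∈ cur :: l := by
  induction l generalizing cur with
  | nil => simp [pvH]
  | cons x l ih =>
    have hstep : pvH cur (x :: l) = pvH (if pvTagP x then x else cur) l := by
      unfold pvH; rw [List.foldl_cons]
    rw [hstep]
    rcases List.mem_cons.mp (ih (if pvTagP x then x else cur)) with h | h
    · rw [h]
      by_cases ht : pvTagP x
      · rw [if_pos ht]; simp
      · rw [if_neg ht]; simp
    · simp [h]

theorem pvH_getLast (l : List (List (String × String))) (cur : List (String × String)) :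
    pvH cur l = ((l.filter pvTagP).getLast?).getD cur := by
  induction l using List.reverseRecOn with
  | nil => rfl
  | append_singleton l x ih =>
    unfold pvH
    rw [List.foldl_append, List.foldl_cons, List.foldl_nil, List.filter_append]
    by_cases ht : pvTagP x
    · simp [ht]
    · have hh := ih
      unfold pvH at hh
      simp [ht, hh]

theorem pvGetLast?_cons (v : List (String × String)) (l : List (List (String × String))) :
    (v :: l).getLast? = some (l.getLast?.getD v) := by
  cases l using List.reverseRecOn with
  | nil => rfl
  | append_singleton l x =>
    rw [← List.cons_append, List.getLast?_concat, List.getLast?_concat]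
    rfl

theorem pvGlv_choose (vs : List (List (String × String))) (h : vs ≠ []) :
    get_latest_version vs = some (pvChoose vs) := by
  match vs with
  | v :: rest =>
    unfold get_latest_version
    have hfilt : (v :: rest).filter (fun i => (pvKey i "tag").getD "" != "latest")
        = (v :: rest).filter pvTagP := rfl
    by_cases hnl : (v :: rest).filter pvTagP = []
    · rw [hfilt]
      simp only [hnl, ne_eq, not_true_eq_false, if_false, reduceCtorEq, not_false_eq_true, if_true]
      have hv : pvTagP v = false := by
        by_contra hx
        simp only [Bool.not_eq_false] at hx
        simp [hx] at hnl
      have hr : rest.filter pvTagP = [] := by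
        rw [List.filter_cons, hv] at hnl
        simpa using hnl
      have hc : pvChoose (v :: rest) = v := by
        simp [pvChoose, pvH_getLast, hr]
      rw [hc]
      simp [PySem.List.pyGet?, PySem.List.pyIdx?]
    · rw [hfilt]
      simp only [hnl, ne_eq, not_false_eq_true, if_true]
      obtain ⟨l0, x0, hfx⟩ := (List.eq_nil_or_concat ((v :: rest).filter pvTagP)).resolve_left hnl
      rw [List.concat_eq_append] at hfx
      rw [hfx]
      have hget : PySem.List.pyGet? (l0 ++ [x0]) (-1) = some x0 := by
        simp [PySem.List.pyGet?, PySem.List.pyIdx?]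
      rw [hget]
      have hc : pvChoose (v :: rest) = ((rest.filter pvTagP).getLast?).getD v := by
        rw [show pvChoose (v :: rest) = pvH v rest from rfl, pvH_getLast]
      rw [hc]
      rw [List.filter_cons] at hfx
      by_cases hv : pvTagP v = true
      · rw [if_pos hv] at hfx
        have h2 := pvGetLast?_cons v (rest.filter pvTagP)
        rw [hfx, List.getLast?_concat] at h2
        exact h2
      · rw [if_neg hv] at hfx
        rw [hfx, List.getLast?_concat]
        rfl

theorem pvChoose_mem (vs : List (List (String × String))) (h : vs ≠ []) : pvChoose vs ∈ vs := by
  match vs with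
  | v :: rest => exact pvH_mem rest v

-- ===== VERDICT (by name: the statement is the Claim_ definition above) =====
theorem get_latest_images_spec : Claim_equal_get_latest_images := by
    intro images hdom hpre
    unfold Spec_get_latest_images
    have himg : ∀ img ∈ images, img ≠ [] := by
      intro img hm hnil
      have h1 := (hpre img hm).1
      rw [hnil] at h1
      exact absurd h1 (by decide)
    have hGdef : group_by_name images = images.foldl pvStepA PySem.Dict.empty := rfl
    have hkeysA : (group_by_name images).keys = PySem.Set.ofList (images.map pvName) := by
      rw [hGdef, pvFoldA_keys]
      rfl
    have hnd : (group_by_name images).keys.Nodup := by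
      rw [hkeysA]; exact PySem.Set.nodup_ofList _
    have hgd : ∀ k, (group_by_name images).getD k [] = images.filter (fun i => pvName i == k) := by
      intro k
      rw [hGdef, pvFoldA_getD]
      rfl
    have hkmem : ∀ k ∈ (group_by_name images).keys,
        ∃ v rest, images.filter (fun i => pvName i == k) = v :: rest := by
      intro k hk
      rw [hkeysA] at hk
      rw [PySem.Set.mem_ofList] at hk
      obtain ⟨i, hi, hik⟩ := List.mem_map.mp hk
      have : i ∈ images.filter (fun i => pvName i == k) :=
        List.mem_filter.mpr ⟨hi, by simp [hik]⟩
      cases hx : images.filter (fun i => pvName i == k) with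
      | nil => rw [hx] at this; exact absurd this (by simp)
      | cons v rest => exact ⟨v, rest, rfl⟩
    have hitems : (group_by_name images).items
        = (group_by_name images).keys.map (fun k => (k, images.filter (fun i => pvName i == k))) := by
      rw [PySem.Dict.items_eq_map_keys _ hnd []]
      exact List.map_congr_left (fun k _ => by rw [hgd])
    have hfilt_sub : ∀ k, ∀ i ∈ images.filter (fun j => pvName j == k), i ∈ images := by
      intro k i hi; exact (List.mem_filter.mp hi).1
    -- A's final loop inserts choose of each group
    have hstep : ∀ (latest : PySem.Dict String (List (String × String))) nv,
        nv ∈ (group_by_name images).items →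
        (match get_latest_version nv.2 with
          | some lv => if lv ≠ [] then latest.insert nv.1 lv else latest
          | none => latest) = latest.insert nv.1 (pvChoose nv.2) := by
      intro latest nv hnv
      rw [hitems] at hnv
      obtain ⟨k, hk, hkv⟩ := List.mem_map.mp hnv
      obtain ⟨v, rest, hvr⟩ := hkmem k hk
      have hne : nv.2 ≠ [] := by rw [← hkv]; simp [hvr]
      have hmem : pvChoose nv.2 ∈ nv.2 := pvChoose_mem _ hne
      have h2 : nv.2 = images.filter (fun i => pvName i == k) := by rw [← hkv]
      have hchne : pvChoose nv.2 ≠ [] := by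
        apply himg
        apply hfilt_sub k
        rw [← h2]
        exact hmem
      rw [pvGlv_choose nv.2 hne]
      simp [hchne]
    have hA : get_latest_images images
        = (group_by_name images).items.map (fun nv => (nv.1, pvChoose nv.2)) := by
      show ((group_by_name images).items.foldl _ PySem.Dict.empty).items = _
      rw [PySem.List.foldl_congr_mem _ _ (fun d (a : String × List (List (String × String))) => d.insert a.1 (pvChoose a.2)) _ hstep]
      rw [PySem.Dict.items_foldl_insert_fresh _ _ _ _
        (fun a _ => PySem.Dict.contains_empty _) (by simpa [PySem.Dict.keys] using hnd)]
      simp [show (PySem.Dict.empty : PySem.Dict String (List (String × String))).items = [] from rfl]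
    -- B side
    have hBdef : get_latest_images_alt images = (images.foldl pvStepB PySem.Dict.empty).items := rfl
    have hkeysB : (images.foldl pvStepB PySem.Dict.empty).keys = PySem.Set.ofList (images.map pvName) := by
      rw [pvFoldB_keys]
      rfl
    have hndB : (images.foldl pvStepB PySem.Dict.empty).keys.Nodup := by
      rw [hkeysB]; exact PySem.Set.nodup_ofList _
    have hget : ∀ k ∈ (images.foldl pvStepB PySem.Dict.empty).keys,
        (images.foldl pvStepB PySem.Dict.empty).get? k
          = some (pvChoose (images.filter (fun i => pvName i == k))) := by
      intro k hk
      rw [hkeysB, ← hkeysA] at hk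
      obtain ⟨v, rest, hvr⟩ := hkmem k hk
      rw [pvFoldB_get?]
      have h0 : (PySem.Dict.empty : PySem.Dict String (List (String × String))).get? k = none := rfl
      rw [h0, pvG_filter, hvr]
      have hvk : (pvName v == k) = true := by
        have : v ∈ images.filter (fun i => pvName i == k) := by rw [hvr]; simp
        simpa using (List.mem_filter.mp this).2
      have hrest : ∀ i ∈ rest, pvName i = k := by
        intro i hi
        have : i ∈ images.filter (fun j => pvName j == k) := by rw [hvr]; simp [hi]
        simpa using (List.mem_filter.mp this).2
      show pvG k none (v :: rest) = _
      have h1 : pvG k none (v :: rest) = pvG k (some v) rest := by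
        unfold pvG
        rw [List.foldl_cons]
        simp [hvk]
      rw [h1, pvG_some k rest v hrest]
      rfl
    have hB : get_latest_images_alt images
        = (images.foldl pvStepB PySem.Dict.empty).keys.map
            (fun k => (k, pvChoose (images.filter (fun i => pvName i == k)))) := by
      rw [hBdef, PySem.Dict.items_eq_map_keys _ hndB []]
      refine List.map_congr_left (fun k hk => ?_)
      rw [PySem.Dict.getD_eq_get?_getD, hget k hk]
      rfl
    rw [hA, hitems, List.map_map, hB, hkeysA, hkeysB]
    rfl
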